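-- pv_equiv track=rewrite | github.com/Hi-Im-Simon/Advent-of-Code | 2021/day-14.py | prep_input
-- ===== SOURCE A (Python) =====
-- def prep_input(f):
--     pair = {}
--     switch = 0
--     for line in f:
--         if line == '':
--             switch = 1
--         elif switch:
--             line = line.split(' -> ')
--             pair[line[0]] = line[1]
--         else:
--             polymer = line
--     return polymer, pair
-- ===== SOURCE B (Python) =====
-- def prep_input(f):
--     i = f.index('') if '' in f else len(f)
--     polymer = f[:i][-1]
--     pair = {parts[0]: parts[1]
--             for parts in (line.split(' -> ') for line in f[i + 1:] if line != '')}
--     return polymer, pair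
-- ===== Notes on version B (the rewrite author's own statement) =====
-- stated objective: alternative
-- what changed: Replaces A's flag-driven stateful pass with a declarative decomposition: locate the first blank line with list.index, take the template as the last element of the slice before it, and build the rule dict with a dict comprehension over the filtered slice after it.
import Mathlib
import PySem

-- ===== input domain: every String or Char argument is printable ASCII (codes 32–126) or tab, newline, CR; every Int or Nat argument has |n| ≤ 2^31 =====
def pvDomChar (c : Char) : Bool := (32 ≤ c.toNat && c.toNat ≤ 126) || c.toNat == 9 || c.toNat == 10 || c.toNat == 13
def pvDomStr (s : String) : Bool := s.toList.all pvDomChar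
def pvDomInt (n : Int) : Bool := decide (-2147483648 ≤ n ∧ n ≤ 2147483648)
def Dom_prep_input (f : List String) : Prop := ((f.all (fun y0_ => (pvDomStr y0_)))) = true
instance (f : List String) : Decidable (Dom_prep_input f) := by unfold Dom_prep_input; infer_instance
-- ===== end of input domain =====

-- B replaces A's flag-driven stateful pass by a declarative decomposition: locate the first
-- blank line by index, take the template as the last element of the slice before it, and
-- build the rule dict by a comprehension over the filtered slice after it; objective: alternative.

-- ===== PORT A =====
-- state: (pair dict, switch, polymer); polymer is Option — none = unbound (excluded by Pre_)
def prepAStep (st : PySem.Dict String String × Int × Option String) (line : String) :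
    PySem.Dict String String × Int × Option String :=
  if line == "" then (st.1, 1, st.2.2)
  else if st.2.1 ≠ 0 then
    let parts := (PySem.Str.split? line " -> ").getD []
    (st.1.insert (PySem.List.pyGetD parts 0 "") (PySem.List.pyGetD parts 1 ""), st.2.1, st.2.2)
  else (st.1, st.2.1, some line)

def prep_input (f : List String) : String × (List (String × String)) :=
  let st := f.foldl prepAStep (PySem.Dict.empty, 0, none)
  ((st.2.2).getD "", st.1.items)

-- ===== PORT B =====
-- i = f.index('') if '' in f else len(f)
def altSepIdx (f : List String) : Int :=
  match PySem.List.index? f "" with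
  | some j => (j : Int)
  | none => (f.length : Int)

def prep_input_alt (f : List String) : String × (List (String × String)) :=
  let i := altSepIdx f
  -- polymer = f[:i][-1]  (none = IndexError, excluded by Pre_)
  let polymer := (PySem.List.pyGet? (PySem.List.slice f none (some i)) (-1)).getD ""
  -- {parts[0]: parts[1] for parts in (line.split(' -> ') for line in f[i+1:] if line != '')}
  let rules := ((PySem.List.slice f (some (i + 1)) none).filter (fun line => line ≠ "")).map
      (fun line => (PySem.Str.split? line " -> ").getD [])
  let pair := rules.foldl
      (fun d parts => d.insert (PySem.List.pyGetD parts 0 "") (PySem.List.pyGetD parts 1 ""))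
      PySem.Dict.empty
  (polymer, pair.items)

-- ===== PRECONDITION & SPEC =====
-- Pre_ excludes exactly the inputs where Python A raises: no non-blank line before the first blank
-- (UnboundLocalError on polymer) or a non-blank rule line after the blank without ' -> ' (IndexError);
-- B raises at the same inputs (IndexError at both).
def Pre_prep_input (f : List String) : Prop :=
  f.takeWhile (fun s => s ≠ "") ≠ [] ∧
  ∀ s ∈ (f.dropWhile (fun s => s ≠ "")).drop 1, s ≠ "" → PySem.Str.isIn " -> " s = true
instance (f : List String) : Decidable (Pre_prep_input f) := by unfold Pre_prep_input; infer_instance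

def pvWitness_prep_input : List String := ["NNCB", "", "CH -> B", "HH -> N"]

def Spec_prep_input (f : List String) (out : String × (List (String × String))) : Prop := out = prep_input_alt f
instance (f : List String) (out : String × (List (String × String))) : Decidable (Spec_prep_input f out) := by unfold Spec_prep_input; infer_instance

-- ===== CLAIM (what is proved, stated in full; the proofs are below) =====
def Claim_equal_prep_input : Prop := ∀ (f : List String), Dom_prep_input f → Pre_prep_input f → Spec_prep_input f (prep_input f)

-- ===== LEMMAS AND PROOFS =====

-- A's pass on a blank-free prefix: the dict and switch do not move, polymer tracks the last line
lemma foldA_blankfree (pre : List String) (h : ∀ x ∈ pre, x ≠ "")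
    (d : PySem.Dict String String) (p : Option String) :
    pre.foldl prepAStep (d, 0, p) = (d, 0, pre.foldl (fun _ x => some x) p) := by
  induction pre generalizing p with
  | nil => rfl
  | cons line rest ih =>
    have hl : line ≠ "" := h line (by simp)
    simp only [List.foldl, prepAStep, beq_iff_eq, hl, if_false, if_neg (by simp : ¬((0:Int) ≠ 0))]
    exact ih (fun x hx => h x (by simp [hx])) (some line)

-- "last line seen" of a fold is getLast? (or the incoming value on the empty list)
lemma foldl_lastSeen (l : List String) (p : Option String) :
    l.foldl (fun _ x => some x) p = (l.getLast?).or p := by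
  induction l generalizing p with
  | nil => rfl
  | cons a t ih =>
    cases t with
    | nil => rfl
    | cons b t' => simpa using ih (some a)

-- with switch = 1, A's pass only parses non-blank rule lines into the dict
lemma foldA_switch_one (rest : List String) (d : PySem.Dict String String) (p : Option String) :
    rest.foldl prepAStep (d, 1, p)
      = (((rest.filter (fun line => line ≠ "")).map
            (fun line => (PySem.Str.split? line " -> ").getD [])).foldl
          (fun d parts => d.insert (PySem.List.pyGetD parts 0 "") (PySem.List.pyGetD parts 1 ""))
          d, 1, p) := by
  induction rest generalizing d with
  | nil => rfl
  | cons line rest ih =>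
    by_cases h : line = ""
    · simp [List.foldl, prepAStep, List.filter, h, ih]
    · simp [List.foldl, prepAStep, List.filter, h, ih]

-- x[-1] on a list is getLast?
lemma pyGet?_neg_one (l : List String) : PySem.List.pyGet? l (-1) = l.getLast? := by
  cases l with
  | nil => rfl
  | cons a t =>
    simp [PySem.List.pyGet?, PySem.List.pyIdx?, List.getLast?_eq_getElem?]

-- ===== VERDICT (by name: the statement is the Claim_ definition above) =====
theorem prep_input_spec : Claim_equal_prep_input := by
  intro f _ _
  unfold Spec_prep_input prep_input prep_input_alt altSepIdx
  cases hidx : PySem.List.index? f "" with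
  | none =>
    have hnotin : "" ∉ f := (PySem.List.index?_eq_none_iff f "").mp hidx
    have hbf : ∀ x ∈ f, x ≠ "" := fun x hx he => hnotin (he ▸ hx)
    have h1 : PySem.List.slice f none (some ((f.length : Nat) : Int)) = f := by
      rw [PySem.List.slice_to_natCast]; simp
    have h2 : PySem.List.slice f (some (((f.length : Nat) : Int) + 1)) none = [] := by
      have : ((f.length : Nat) : Int) + 1 = (((f.length + 1 : Nat)) : Int) := by push_cast; ring
      rw [this, PySem.List.slice_from_natCast]; simp
    simp only [foldA_blankfree f hbf, foldl_lastSeen, h1, h2, pyGet?_neg_one]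
    simp
  | some j =>
    obtain ⟨pre, suf, hdecomp, hlen, hnotin⟩ := (PySem.List.index?_eq_some_iff f "" j).mp hidx
    have hbf : ∀ x ∈ pre, x ≠ "" := fun x hx he => hnotin (he ▸ hx)
    have htake : PySem.List.slice f none (some ((j : Nat) : Int)) = pre := by
      rw [PySem.List.slice_to_natCast, hdecomp, ← hlen]
      simp
    have hdrop : PySem.List.slice f (some (((j : Nat) : Int) + 1)) none = suf := by
      have : ((j : Nat) : Int) + 1 = (((j + 1 : Nat)) : Int) := by push_cast; ring
      rw [this, PySem.List.slice_from_natCast, hdecomp, ← hlen]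
      simp [List.drop_append]
    have hfold : f.foldl prepAStep (PySem.Dict.empty, 0, none)
        = (pre ++ "" :: suf).foldl prepAStep (PySem.Dict.empty, 0, none) := by rw [hdecomp]
    rw [hfold, List.foldl_append, foldA_blankfree pre hbf]
    simp only [List.foldl, prepAStep, beq_self_eq_true, if_true]
    rw [foldA_switch_one, htake, hdrop, foldl_lastSeen, pyGet?_neg_one]
    simp
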